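-- pv_equiv track=rewrite | github.com/arttype1/Computational_Intelligence | Chapter_02/exercise_2_01.py | outcome
-- ===== SOURCE A (Python) =====
-- facts = ['e', ' ']
--
-- rules = [('a', 'b', 'c'), ('a', 'e', 'f'), ('b', 'd', ' '), ('c', 'e', ' '), ('d', 'h', ' '),
--          ('f', 'g', ' '), ('g', 'c', ' ')]
--
-- def outcome(head):
--     if head in facts:
--         return True
--     else:
--         body = [item for item in rules if item[0] == head]
--         for i in body:
--             if outcome(i[1]) and outcome(i[2]):
--                 return True
--         else:
--             return False
-- ===== SOURCE B (Python) =====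
-- facts = ['e', ' ']
--
-- rules = [('a', 'b', 'c'), ('a', 'e', 'f'), ('b', 'd', ' '), ('c', 'e', ' '), ('d', 'h', ' '),
--          ('f', 'g', ' '), ('g', 'c', ' ')]
--
--
-- def outcome(head):
--     # forward chaining: saturate the set of derivable symbols, then test membership
--     derived = set(facts)
--     for _ in range(len(rules)):          # len(rules) sweeps are enough to reach the fixpoint
--         for a, b, c in rules:
--             if b in derived and c in derived:
--                 derived.add(a)
--     return head in derived
-- ===== Notes on version B (the rewrite author's own statement) =====
-- stated objective: alternative
-- what changed: Replaced the goal-directed backward-chaining recursion by data-driven forward chaining: compute the full derivable closure by bounded saturation sweeps over the rules, then answer with one membership test.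
import Mathlib
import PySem

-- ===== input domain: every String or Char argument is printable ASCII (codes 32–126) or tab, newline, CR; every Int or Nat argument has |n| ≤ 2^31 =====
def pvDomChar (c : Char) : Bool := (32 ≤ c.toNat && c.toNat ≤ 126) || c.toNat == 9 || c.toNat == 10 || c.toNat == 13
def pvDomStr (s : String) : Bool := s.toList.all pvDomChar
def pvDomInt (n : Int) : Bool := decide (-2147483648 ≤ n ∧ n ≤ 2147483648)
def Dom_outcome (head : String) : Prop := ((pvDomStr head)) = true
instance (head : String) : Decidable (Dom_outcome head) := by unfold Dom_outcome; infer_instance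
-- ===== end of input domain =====

set_option maxRecDepth 4000


-- B replaces A's backward-chaining recursion by forward chaining to a fixpoint (alternative algorithm, similar cost).

-- ===== PORT A =====
def pvFacts : List String := ["e", " "]

def pvRules : List (String × String × String) :=
  [("a", "b", "c"), ("a", "e", "f"), ("b", "d", " "), ("c", "e", " "), ("d", "h", " "),
   ("f", "g", " "), ("g", "c", " ")]

-- fuel makes A's recursion structural; 8 exceeds A's recursion depth on the fixed rule base,
-- so the fuel branch is never reached (a totality guard only).
-- the for/return/else-False loop over `body` is `List.any` (same order, same short-circuit)
def outcomeFuel : Nat → String → Bool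
  | 0, _ => false
  | n + 1, head =>
    if pvFacts.contains head then true
    else
      (pvRules.filter (fun item => item.1 == head)).any
        (fun i => outcomeFuel n i.2.1 && outcomeFuel n i.2.2)

def outcome (head : String) : Bool := outcomeFuel 8 head

-- ===== PORT B =====
def outcome_alt (head : String) : Bool :=
  let derived :=
    (List.range pvRules.length).foldl
      (fun d _ =>
        pvRules.foldl
          (fun d r =>
            if PySem.Set.contains d r.2.1 && PySem.Set.contains d r.2.2 then
              PySem.Set.add d r.1
            else d)
          d)
      (PySem.Set.ofList pvFacts)
  PySem.Set.contains derived head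

-- ===== PRECONDITION & SPEC =====
def Spec_outcome (head : String) (out : Bool) : Prop := out = outcome_alt head
instance (head : String) (out : Bool) : Decidable (Spec_outcome head out) := by unfold Spec_outcome; infer_instance

-- ===== CLAIM (what is proved, stated in full; the proofs are below) =====
def Claim_equal_outcome : Prop := ∀ (head : String), Dom_outcome head → Spec_outcome head (outcome head)

-- ===== LEMMAS AND PROOFS =====

-- B's closure is the concrete saturated set; it does not depend on head.
lemma alt_eval (head : String) :
    outcome_alt head = (["e", " ", "c", "g", "f", "a"] : List String).contains head := rfl

lemma outcome_irrelevant (head : String)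
    (h : head ∉ (["a", "b", "c", "d", "e", "f", "g", " "] : List String)) :
    outcome head = false := by
  simp only [List.mem_cons, List.not_mem_nil, or_false, not_or] at h
  obtain ⟨ha, hb, hc, hd, he, hf, hg, hs⟩ := h
  simp [outcome, outcomeFuel, pvFacts, pvRules,
        Ne.symm ha, Ne.symm hb, Ne.symm hc, Ne.symm hd, Ne.symm hf, Ne.symm hg]
  exact ⟨he, hs⟩

lemma alt_irrelevant (head : String)
    (h : head ∉ (["a", "b", "c", "d", "e", "f", "g", " "] : List String)) :
    outcome_alt head = false := by
  simp only [List.mem_cons, List.not_mem_nil, or_false, not_or] at h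
  obtain ⟨ha, hb, hc, hd, he, hf, hg, hs⟩ := h
  rw [alt_eval]
  simp only [List.contains_eq_mem, List.mem_cons, List.not_mem_nil, or_false, decide_eq_false_iff_not, not_or]
  exact ⟨he, hs, hc, hg, hf, ha⟩

-- ===== VERDICT (by name: the statement is the Claim_ definition above) =====
theorem outcome_spec : Claim_equal_outcome := by
  intro head _
  unfold Spec_outcome
  by_cases h : head ∈ (["a", "b", "c", "d", "e", "f", "g", " "] : List String)
  · fin_cases h <;> decide
  · rw [outcome_irrelevant head h, alt_irrelevant head h]
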